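-- pv_equiv track=rewrite | github.com/birc-gsa-2022/project-1-python-asg | src/lin.py | strict_border_array
-- ===== SOURCE A (Python) =====
-- def border_array(x:str):
--     if x == '' or x == None:
--         return []
--     ba = [0]
--     j = 0
--     for i in range(1,len(x)):
--         while x[i] != x[j] and j > 0:
--             j = ba[j-1]
--         if x[i] == x[j]:
--             ba.append(j+1)
--             j+=1
--         if j == 0:
--             ba.append(j)
--     return ba
--
-- def strict_border_array(x:str):
--     if x == '' or x == None:
--         return []
--     ba = border_array(x)
--     for i in range(len(x)-1):
--         if ba[i] > 0 and x[ba[i]] == x[i+1]: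
--             ba[i] = ba[ba[i]-1]
--     return ba
-- ===== SOURCE B (Python) =====
-- def strict_border_array(x: str):
--     # One fused forward pass: computes the plain border values and finalizes
--     # the strict value for position i-1 as soon as x[i] is known.
--     if not x:
--         return []
--     n = len(x)
--     ba = [0] * n
--     strict = [0] * n
--     j = 0
--     for i in range(1, n):
--         while j > 0 and x[i] != x[j]:
--             j = ba[j - 1]
--         if x[i] == x[j]:
--             j += 1
--         ba[i] = j
--         b = ba[i - 1]
--         if b > 0 and x[b] == x[i]:
--             strict[i - 1] = strict[b - 1]
--         else:
--             strict[i - 1] = b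
--     strict[n - 1] = ba[n - 1]
--     return strict
-- ===== Notes on version B (the rewrite author's own statement) =====
-- stated objective: alternative
-- what changed: Replaces A's build-then-fix two-pass structure (full border array, then a second fix-up loop mutating it) with a single fused forward pass that maintains the plain border value for the KMP-style jumps and finalizes each strict entry as soon as the next character is read.
import Mathlib
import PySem

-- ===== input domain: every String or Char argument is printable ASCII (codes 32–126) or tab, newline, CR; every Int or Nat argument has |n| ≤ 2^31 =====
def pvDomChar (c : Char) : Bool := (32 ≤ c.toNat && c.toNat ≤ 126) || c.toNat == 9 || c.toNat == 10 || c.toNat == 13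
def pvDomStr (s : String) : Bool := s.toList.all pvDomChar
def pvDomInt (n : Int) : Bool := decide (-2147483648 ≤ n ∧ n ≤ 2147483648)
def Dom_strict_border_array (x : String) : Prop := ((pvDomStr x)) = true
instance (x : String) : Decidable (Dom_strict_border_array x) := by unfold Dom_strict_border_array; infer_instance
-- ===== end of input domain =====

-- B fuses A's build-then-fix two-pass structure into one forward pass that finalizes each
-- strict value as soon as the next character is read (objective: alternative decomposition).
-- Internal border values are kept as Nat (they are list lengths, always ≥ 0 in Python) and
-- cast to Int at the very end; all Python indexing below is in range, so getD is exact.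

-- ===== PORT A =====
-- the 'while x[i] != x[j] and j > 0: j = ba[j-1]' loop; fuel = initial j suffices because
-- border values satisfy ba[m] ≤ m, so j strictly decreases (proved in pvW_decr below)
def pvW (xs : List Char) (ba : List Nat) (i : Nat) : Nat → Nat → Nat
  | 0, j => j
  | f+1, j => if xs.getD i ' ' ≠ xs.getD j ' ' ∧ 0 < j then pvW xs ba i f (ba.getD (j-1) 0) else j

-- one iteration of border_array's for-loop: state (ba, j), index i
def pvStepA (xs : List Char) (s : List Nat × Nat) (i : Nat) : List Nat × Nat :=
  let j1 := pvW xs s.1 i s.2 s.2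
  let s2 := if xs.getD i ' ' = xs.getD j1 ' ' then (s.1 ++ [j1+1], j1+1) else (s.1, j1)
  if s2.2 = 0 then (s2.1 ++ [s2.2], s2.2) else s2

def pvBorder (x : String) : List Nat :=
  if x = "" then []
  else ((List.range' 1 (x.toList.length - 1)).foldl (pvStepA x.toList) ([0], 0)).1

-- one iteration of the fix-up loop 'if ba[i] > 0 and x[ba[i]] == x[i+1]: ba[i] = ba[ba[i]-1]'
def pvStrictStep (xs : List Char) (ba : List Nat) (i : Nat) : List Nat :=
  let b := ba.getD i 0
  if 0 < b ∧ xs.getD b ' ' = xs.getD (i+1) ' ' then ba.set i (ba.getD (b-1) 0) else ba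

def strict_border_array (x : String) : List Int :=
  if x = "" then []   -- 'x == None' cannot occur for a String argument
  else ((List.range (x.toList.length - 1)).foldl (pvStrictStep x.toList) (pvBorder x)).map Int.ofNat

-- ===== PORT B =====
-- B's while loop 'while j > 0 and x[i] != x[j]' (conjuncts in B's order)
def pvWB (xs : List Char) (ba : List Nat) (i : Nat) : Nat → Nat → Nat
  | 0, j => j
  | f+1, j => if 0 < j ∧ xs.getD i ' ' ≠ xs.getD j ' ' then pvWB xs ba i f (ba.getD (j-1) 0) else j

-- one iteration of B's fused loop: state (ba, strict, j), index i
def pvStepB (xs : List Char) (s : List Nat × List Nat × Nat) (i : Nat) : List Nat × List Nat × Nat :=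
  let j1 := pvWB xs s.1 i s.2.2 s.2.2
  let j := if xs.getD i ' ' = xs.getD j1 ' ' then j1 + 1 else j1
  let ba := s.1.set i j
  let b := ba.getD (i-1) 0
  let st := if 0 < b ∧ xs.getD b ' ' = xs.getD i ' '
            then s.2.1.set (i-1) (s.2.1.getD (b-1) 0)
            else s.2.1.set (i-1) b
  (ba, st, j)

def strict_border_array_alt (x : String) : List Int :=
  if x = "" then []
  else
    let xs := x.toList
    let n := xs.length
    let r := (List.range' 1 (n-1)).foldl (pvStepB xs) (List.replicate n 0, List.replicate n 0, 0)
    (r.2.1.set (n-1) (r.1.getD (n-1) 0)).map Int.ofNat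

-- ===== PRECONDITION & SPEC =====
def Spec_strict_border_array (x : String) (out : List Int) : Prop := out = strict_border_array_alt x
instance (x : String) (out : List Int) : Decidable (Spec_strict_border_array x out) := by unfold Spec_strict_border_array; infer_instance

-- ===== CLAIM (what is proved, stated in full; the proofs are below) =====
def Claim_equal_strict_border_array : Prop := ∀ (x : String), Dom_strict_border_array x → Spec_strict_border_array x (strict_border_array x)

-- ===== LEMMAS AND PROOFS =====

-- the finalized strict values for positions < k, given plain border list p
def pvSarr (xs : List Char) (p : List Nat) : Nat → List Nat
  | 0 => []
  | k+1 =>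
    let s := pvSarr xs p k
    let b := p.getD k 0
    s ++ [if 0 < b ∧ xs.getD b ' ' = xs.getD (k+1) ' ' then s.getD (b-1) 0 else b]

lemma pvSarr_length (xs : List Char) (p : List Nat) (k : Nat) : (pvSarr xs p k).length = k := by
  induction k with
  | zero => simp [pvSarr]
  | succ k ih => simp [pvSarr, ih]

lemma pvSarr_congr (xs : List Char) (p q : List Nat) (k : Nat)
    (h : ∀ m < k, p.getD m 0 = q.getD m 0) : pvSarr xs p k = pvSarr xs q k := by
  induction k with
  | zero => simp [pvSarr]
  | succ k ih =>
    have hk := h k (by omega)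
    have ih' := ih (fun m hm => h m (by omega))
    simp only [List.getD] at hk
    simp [pvSarr, ih', hk]

lemma pvGetD_append_rep (a : List Nat) (k m : Nat) :
    (a ++ List.replicate k 0).getD m 0 = a.getD m 0 := by
  rcases lt_or_ge m a.length with h | h
  · simp [List.getD_eq_getElem?_getD, List.getElem?_append_left h]
  · rw [List.getD_eq_getElem?_getD, List.getD_eq_getElem?_getD]
    rcases lt_or_ge m (a.length + k) with h2 | h2
    · rw [List.getElem?_append_right h, List.getElem?_eq_getElem (by simp; omega)]
      simp [List.getElem_replicate, List.getElem?_eq_none h]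
    · rw [List.getElem?_eq_none (by simp; omega), List.getElem?_eq_none (by omega)]

lemma pvGetD_append_left (a t : List Nat) (m : Nat) (h : m < a.length) :
    (a ++ t).getD m 0 = a.getD m 0 := by
  simp [List.getD_eq_getElem?_getD, List.getElem?_append_left h]

lemma pvGetD_append_len (a : List Nat) (c : Nat) (t : List Nat) (m : Nat) (h : m = a.length) :
    (a ++ c :: t).getD m 0 = c := by
  subst h; simp [List.getD_eq_getElem?_getD]

lemma pvSet_append_len (a b : List Nat) (v m : Nat) (h : m = a.length) :
    (a ++ b).set m v = a ++ b.set 0 v := by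
  subst h; rw [List.set_append]; simp

lemma pvDrop_cons (p : List Nat) (m : Nat) (h : m < p.length) :
    p.drop m = p.getD m 0 :: p.drop (m+1) := by
  rw [List.drop_eq_getElem_cons h]
  simp [List.getD_eq_getElem?_getD, List.getElem?_eq_getElem h]

lemma pvW_congr (xs : List Char) (ba ba' : List Nat) (i : Nat)
    (h : ∀ m, ba.getD m 0 = ba'.getD m 0) :
    ∀ f j, pvW xs ba i f j = pvWB xs ba' i f j := by
  intro f
  induction f with
  | zero => intro j; simp [pvW, pvWB]
  | succ f ih =>
    intro j
    simp only [pvW, pvWB]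
    by_cases hc : xs.getD i ' ' ≠ xs.getD j ' ' ∧ 0 < j
    · rw [if_pos hc, if_pos ⟨hc.2, hc.1⟩, h, ih]
    · rw [if_neg hc, if_neg (fun hc' => hc ⟨hc'.2, hc'.1⟩)]

-- with ba[m] ≤ m, fuel ≥ j is enough and the loop's exit condition holds at the result
lemma pvW_decr (xs : List Char) (ba : List Nat) (i : Nat)
    (hba : ∀ m, ba.getD m 0 ≤ m) :
    ∀ f j, j ≤ f →
      pvW xs ba i f j ≤ j ∧
      (xs.getD i ' ' = xs.getD (pvW xs ba i f j) ' ' ∨ pvW xs ba i f j = 0) := by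
  intro f
  induction f with
  | zero =>
    intro j hj
    have : j = 0 := by omega
    simp [pvW, this]
  | succ f ih =>
    intro j hj
    simp only [pvW]
    by_cases hc : xs.getD i ' ' ≠ xs.getD j ' ' ∧ 0 < j
    · rw [if_pos hc]
      have hlt : ba.getD (j-1) 0 ≤ j - 1 := hba (j-1)
      have := ih (ba.getD (j-1) 0) (by omega)
      exact ⟨by omega, this.2⟩
    · rw [if_neg hc]
      refine ⟨le_refl _, ?_⟩
      by_cases he : xs.getD i ' ' = xs.getD j ' '
      · exact Or.inl he
      · exact Or.inr (Nat.le_zero.mp (Nat.not_lt.mp (not_and.mp hc he)))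

-- the joint invariant of A's first pass and B's fused pass, after the iterations 1..k
lemma pvMain (xs : List Char) (n : Nat) (hn : n = xs.length) (hn1 : 1 ≤ n) :
    ∀ k, k ≤ n - 1 →
      ∃ A : List Nat, ∃ j : Nat,
        (List.range' 1 k).foldl (pvStepA xs) ([0], 0) = (A, j) ∧
        (List.range' 1 k).foldl (pvStepB xs) (List.replicate n 0, List.replicate n 0, 0)
          = (A ++ List.replicate (n-(k+1)) 0, pvSarr xs A k ++ List.replicate (n-k) 0, j) ∧
        A.length = k+1 ∧ (∀ m, A.getD m 0 ≤ m) ∧ j = A.getD k 0 := by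
  intro k
  induction k with
  | zero =>
    intro _
    refine ⟨[0], 0, rfl, ?_, rfl, ?_, rfl⟩
    · simp [pvSarr]
      rw [show n = (n-1)+1 by omega, List.replicate_succ]
      simp
    · intro m; cases m <;> simp [List.getD]
  | succ k ih =>
    intro hk1
    obtain ⟨A, j0, hA, hB, hlen, hle, hj⟩ := ih (by omega)
    have hrange : List.range' 1 (k+1) = List.range' 1 k ++ [k+1] := by
      rw [List.range'_concat]; simp [Nat.add_comm]
    rw [hrange, List.foldl_append, List.foldl_cons, List.foldl_nil, hA,
      List.foldl_append, List.foldl_cons, List.foldl_nil, hB]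
    -- the two while loops compute the same j1
    have hcongr : ∀ f j, pvW xs A (k+1) f j
        = pvWB xs (A ++ List.replicate (n-(k+1)) 0) (k+1) f j :=
      pvW_congr xs _ _ _ (fun m => (pvGetD_append_rep A _ m).symm)
    obtain ⟨hj1le, hexit⟩ := pvW_decr xs A (k+1) hle j0 j0 (le_refl _)
    set j1 := pvW xs A (k+1) j0 j0 with hj1def
    have hj0k : j0 ≤ k := by rw [hj]; exact hle k
    -- the value appended / stored at index k+1 by both sides
    set v : Nat := if xs.getD (k+1) ' ' = xs.getD j1 ' ' then j1 + 1 else 0 with hvdef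
    have hvle : v ≤ k + 1 := by
      rw [hvdef]; split <;> omega
    -- A's step
    have hstepA : pvStepA xs (A, j0) (k+1) = (A ++ [v], v) := by
      simp only [pvStepA, ← hj1def, hvdef]
      by_cases he : xs.getD (k+1) ' ' = xs.getD j1 ' '
      · have he' := he
        simp only [List.getD] at he'
        rw [if_pos he]; simp [he']
      · have hz : j1 = 0 := by
          rcases hexit with h | h
          · exact absurd h he
          · exact h
        have he' := he
        simp only [List.getD] at he'
        have he0 := hz ▸ he'
        rw [if_neg he]; simp [he0, hz]
    -- B's step
    have hrep1 : List.replicate (n-(k+1)) 0 = 0 :: List.replicate (n-(k+2)) 0 := by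
      rw [show n-(k+1) = (n-(k+2))+1 by omega, List.replicate_succ]
    have hrep2 : List.replicate (n-k) 0 = 0 :: List.replicate (n-(k+1)) 0 := by
      rw [show n-k = (n-(k+1))+1 by omega, List.replicate_succ]
    have hgetk : (A ++ List.replicate (n-(k+1)) 0).getD k 0 = A.getD k 0 :=
      pvGetD_append_rep A _ k
    have hsetba : ((A ++ List.replicate (n-(k+1)) 0).set (k+1) v)
        = (A ++ [v]) ++ List.replicate (n-(k+2)) 0 := by
      rw [pvSet_append_len _ _ _ _ hlen.symm, hrep1]
      simp
    have hsar := pvSarr_length xs A k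
    have hsetst : ∀ w : Nat, ((pvSarr xs A k ++ List.replicate (n-k) 0).set k w)
        = pvSarr xs A k ++ w :: List.replicate (n-(k+1)) 0 := by
      intro w
      rw [pvSet_append_len _ _ _ _ hsar.symm, hrep2]
      simp
    -- the strict entry written by B is exactly pvSarr's entry k of the extended list
    have hAv_congr : pvSarr xs (A ++ [v]) k = pvSarr xs A k :=
      pvSarr_congr xs _ _ k (fun m hm => pvGetD_append_left A [v] m (by omega))
    have hAvk : (A ++ [v]).getD k 0 = A.getD k 0 := pvGetD_append_left A [v] k (by omega)
    have hsarr_succ : pvSarr xs (A ++ [v]) (k+1)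
        = pvSarr xs A k ++ [if 0 < A.getD k 0 ∧ xs.getD (A.getD k 0) ' ' = xs.getD (k+1) ' '
            then (pvSarr xs A k).getD (A.getD k 0 - 1) 0 else A.getD k 0] := by
      simp only [pvSarr, hAv_congr, hAvk]
    have hstepB : pvStepB xs
        (A ++ List.replicate (n-(k+1)) 0, pvSarr xs A k ++ List.replicate (n-k) 0, j0) (k+1)
        = ((A ++ [v]) ++ List.replicate (n-(k+2)) 0,
           pvSarr xs (A ++ [v]) (k+1) ++ List.replicate (n-(k+1)) 0, v) := by
      simp only [pvStepB, ← hcongr, ← hj1def]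
      have hjB : (if xs.getD (k+1) ' ' = xs.getD j1 ' ' then j1 + 1 else j1) = v := by
        rw [hvdef]
        by_cases he : xs.getD (k+1) ' ' = xs.getD j1 ' '
        · have he' := he
          simp only [List.getD] at he'
          simp [he']
        · have hz : j1 = 0 := by
            rcases hexit with h | h
            · exact absurd h he
            · exact h
          have he' := he
          simp only [List.getD] at he'
          have he0 := hz ▸ he'
          simp [he0, hz]
      rw [hjB, hsetba]
      have hk1 : (k+1) - 1 = k := by omega
      rw [hk1]
      have hbk : ((A ++ [v]) ++ List.replicate (n-(k+2)) 0).getD k 0 = A.getD k 0 := by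
        rw [pvGetD_append_rep, hAvk]
      rw [hbk, hsarr_succ]
      by_cases hc : 0 < A.getD k 0 ∧ xs.getD (A.getD k 0) ' ' = xs.getD (k+1) ' '
      · have hread : (pvSarr xs A k ++ List.replicate (n-k) 0).getD (A.getD k 0 - 1) 0
            = (pvSarr xs A k).getD (A.getD k 0 - 1) 0 := pvGetD_append_rep _ _ _
      -- note: A.getD k 0 ≤ k and 0 < it, so the read is inside pvSarr xs A k
        rw [if_pos hc, if_pos hc, hsetst, hread]
        simp
      · rw [if_neg hc, if_neg hc, hsetst]
        simp
    rw [hstepA, hstepB]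
    refine ⟨A ++ [v], v, rfl, rfl, by simp [hlen], ?_, ?_⟩
    · intro m
      rcases lt_or_ge m (k+1) with h | h
      · rw [pvGetD_append_left A [v] m (by omega)]; exact hle m
      · rcases eq_or_lt_of_le h with h' | h'
        · rw [pvGetD_append_len _ _ _ _ (by omega)]
          omega
        · rw [List.getD_eq_default]
          · omega
          · simp [hlen]; omega
    · rw [pvGetD_append_len _ _ _ _ hlen.symm]

-- A's second pass over the finished plain border array computes pvSarr
lemma pvSecondPass (xs : List Char) (p : List Nat) (hl : p.length = xs.length)
    (hb : ∀ m, p.getD m 0 ≤ m) :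
    ∀ k, k ≤ xs.length - 1 →
      (List.range k).foldl (pvStrictStep xs) p = pvSarr xs p k ++ p.drop k := by
  intro k
  induction k with
  | zero => simp [pvSarr]
  | succ k ih =>
    intro hk
    have hkp : k < p.length := by omega
    rw [List.range_succ, List.foldl_append, List.foldl_cons, List.foldl_nil, ih (by omega)]
    have hsar := pvSarr_length xs p k
    have hdrop : p.drop k = p.getD k 0 :: p.drop (k+1) := pvDrop_cons p k hkp
    have hbk : (pvSarr xs p k ++ p.drop k).getD k 0 = p.getD k 0 := by
      rw [hdrop, pvGetD_append_len _ _ _ _ hsar.symm]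
    simp only [pvStrictStep, hbk]
    by_cases hc : 0 < p.getD k 0 ∧ xs.getD (p.getD k 0) ' ' = xs.getD (k+1) ' '
    · have hblt : p.getD k 0 - 1 < k := by have := hb k; omega
      have hread : (pvSarr xs p k ++ p.drop k).getD (p.getD k 0 - 1) 0
          = (pvSarr xs p k).getD (p.getD k 0 - 1) 0 :=
        pvGetD_append_left _ _ _ (by omega)
      rw [if_pos hc, hread, hdrop, pvSet_append_len _ _ _ _ hsar.symm]
      simp only [pvSarr, List.set_cons_zero]
      rw [if_pos hc]
      simp
    · rw [if_neg hc, hdrop]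
      conv_rhs => rw [pvSarr]
      rw [if_neg hc]
      simp

-- ===== VERDICT (by name: the statement is the Claim_ definition above) =====
theorem strict_border_array_spec : Claim_equal_strict_border_array := by
  intro x _
  unfold Spec_strict_border_array strict_border_array strict_border_array_alt pvBorder
  by_cases hx : x = ""
  · rw [if_pos hx, if_pos hx]
  · rw [if_neg hx, if_neg hx, if_neg hx]
    have hne : x.toList ≠ [] := by
      intro hl
      apply hx
      have : x.toList = ("" : String).toList := by simpa using hl
      exact String.toList_inj.mp this
    set xs := x.toList with hxs
    set n := xs.length with hndef
    have hn1 : 1 ≤ n := by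
      have := List.length_pos_of_ne_nil hne
      omega
    dsimp only
    obtain ⟨A, j0, hA, hB, hlen, hle, hj⟩ := pvMain xs n rfl hn1 (n-1) (le_refl _)
    rw [hA, hB]
    have hAlen : A.length = n := by omega
    have h2 := pvSecondPass xs A (by omega) hle (n-1) (le_refl _)
    rw [h2]
    have hdrop : A.drop (n-1) = [A.getD (n-1) 0] := by
      rw [pvDrop_cons A (n-1) (by omega)]
      rw [List.drop_eq_nil_of_le (by omega)]
    have hrep0 : List.replicate (n-((n-1)+1)) (0:Nat) = [] := by
      rw [show n-((n-1)+1) = 0 by omega]; rfl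
    have hrep1 : List.replicate (n-(n-1)) (0:Nat) = [0] := by
      rw [show n-(n-1) = 1 by omega]; rfl
    rw [hrep0, hrep1, List.append_nil]
    have hget : (pvSarr xs A (n-1) ++ [0]).set (n-1) (A.getD (n-1) 0)
        = pvSarr xs A (n-1) ++ [A.getD (n-1) 0] := by
      rw [pvSet_append_len _ _ _ _ (pvSarr_length xs A (n-1)).symm]
      rfl
    rw [hget, hdrop]
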